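-- pv_equiv track=rewrite | github.com/VicInfante/Inteligencia-Artificial | Proyecto 3 Sistema RAG/02_preprocesar_textos.py | dividir_en_fragmentos
-- ===== SOURCE A (Python) =====
-- def dividir_en_fragmentos(texto, palabras_por_fragmento=500):
--     """Divide el texto en fragmentos de ~N palabras"""
--     palabras = texto.split()
--     if len(palabras) <= palabras_por_fragmento:
--         return [texto]
--
--     fragmentos = []
--     for i in range(0, len(palabras), palabras_por_fragmento):
--         fragmento = ' '.join(palabras[i:i+palabras_por_fragmento])
--         fragmentos.append(fragmento)
--     return fragmentos
-- ===== SOURCE B (Python) =====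
-- def dividir_en_fragmentos(texto, palabras_por_fragmento=500):
--     """Divide el texto en fragmentos de ~N palabras (single accumulator pass)"""
--     palabras = texto.split()
--     if len(palabras) <= palabras_por_fragmento:
--         return [texto]
--     fragmentos = []
--     buffer = []
--     for p in palabras:
--         buffer.append(p)
--         if len(buffer) == palabras_por_fragmento:
--             fragmentos.append(' '.join(buffer))
--             buffer = []
--     if buffer:
--         fragmentos.append(' '.join(buffer))
--     return fragmentos
-- ===== Notes on version B (the rewrite author's own statement) =====
-- stated objective: alternative
-- what changed: Replaces index-stride slicing (range with step + per-chunk slice and join) by a single accumulator pass that fills a word buffer and flushes it every N words.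
-- outside the precondition, e.g. on dividir_en_fragmentos('a b', 0): A raises ValueError, B returns ['a b']; on dividir_en_fragmentos('a b', -1): A returns [], B returns ['a b']
import Mathlib
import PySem

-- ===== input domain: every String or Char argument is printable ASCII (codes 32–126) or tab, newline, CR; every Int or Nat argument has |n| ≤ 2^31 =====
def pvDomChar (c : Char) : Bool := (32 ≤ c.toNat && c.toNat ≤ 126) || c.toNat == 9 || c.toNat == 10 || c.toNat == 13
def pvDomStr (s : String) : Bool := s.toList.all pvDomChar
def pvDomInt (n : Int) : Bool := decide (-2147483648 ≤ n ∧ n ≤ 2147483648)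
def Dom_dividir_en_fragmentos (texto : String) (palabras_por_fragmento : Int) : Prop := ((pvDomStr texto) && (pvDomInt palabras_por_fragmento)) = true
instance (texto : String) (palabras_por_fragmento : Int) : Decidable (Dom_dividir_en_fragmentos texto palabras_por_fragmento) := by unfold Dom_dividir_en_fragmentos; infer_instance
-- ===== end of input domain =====

-- B replaces A's index-stride slicing loop by a single buffer-accumulator pass (alternative decomposition, same cost).


-- ===== PORT A =====
def dividir_en_fragmentos (texto : String) (palabras_por_fragmento : Int) : List String :=
  let palabras := PySem.Str.split₀ texto
  if PySem.List.len palabras ≤ palabras_por_fragmento then [texto]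
  else
    (PySem.List.pyRange 0 (PySem.List.len palabras) palabras_por_fragmento).foldl
      (fun fragmentos i =>
        fragmentos ++ [PySem.Str.join " " (PySem.List.slice palabras (some i) (some (i + palabras_por_fragmento)))])
      []

-- ===== PORT B =====
def dividir_en_fragmentos_alt (texto : String) (palabras_por_fragmento : Int) : List String :=
  let palabras := PySem.Str.split₀ texto
  if PySem.List.len palabras ≤ palabras_por_fragmento then [texto]
  else
    let st := palabras.foldl
      (fun (st : List String × List String) p =>
        let buf := st.2 ++ [p]
        if PySem.List.len buf = palabras_por_fragmento then (st.1 ++ [PySem.Str.join " " buf], [])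
        else (st.1, buf))
      ([], [])
    if st.2 ≠ [] then st.1 ++ [PySem.Str.join " " st.2] else st.1

-- ===== PRECONDITION & SPEC =====
-- Pre_ admits the natural domain of chunk sizes ≥ 1 (plus any size when the text has no words, where the
-- programs trivially agree): for palabras_por_fragmento = 0 with a nonempty word list A raises ValueError
-- (range step 0), and for negative sizes with a nonempty word list A's [] is an artefact of range
-- semantics on a negative step, outside the function's purpose.
def Pre_dividir_en_fragmentos (texto : String) (palabras_por_fragmento : Int) : Prop :=
  1 ≤ palabras_por_fragmento ∨ PySem.Str.split₀ texto = []
instance (texto : String) (palabras_por_fragmento : Int) : Decidable (Pre_dividir_en_fragmentos texto palabras_por_fragmento) := by unfold Pre_dividir_en_fragmentos; infer_instance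
def pvWitness_dividir_en_fragmentos : String × Int := ("hola mundo que tal", 2)
def Spec_dividir_en_fragmentos (texto : String) (palabras_por_fragmento : Int) (out : List String) : Prop := out = dividir_en_fragmentos_alt texto palabras_por_fragmento
instance (texto : String) (palabras_por_fragmento : Int) (out : List String) : Decidable (Spec_dividir_en_fragmentos texto palabras_por_fragmento out) := by unfold Spec_dividir_en_fragmentos; infer_instance

-- ===== CLAIM (what is proved, stated in full; the proofs are below) =====
def Claim_equal_dividir_en_fragmentos : Prop := ∀ (texto : String) (palabras_por_fragmento : Int), Dom_dividir_en_fragmentos texto palabras_por_fragmento → Pre_dividir_en_fragmentos texto palabras_por_fragmento → Spec_dividir_en_fragmentos texto palabras_por_fragmento (dividir_en_fragmentos texto palabras_por_fragmento)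

-- ===== LEMMAS AND PROOFS =====

-- Reference chunking: split a word list into consecutive blocks of k words (proof-side helper).
def pvChunks (k : Nat) (l : List String) : List (List String) :=
  if h : l = [] ∨ k = 0 then [] else l.take k :: pvChunks k (l.drop k)
termination_by l.length
decreasing_by
  simp only [not_or] at h
  cases l with
  | nil => exact absurd rfl h.1
  | cons x xs => simp; omega

lemma pvChunks_nil (k : Nat) : pvChunks k [] = [] := by
  unfold pvChunks; simp

lemma pvChunks_cons (k : Nat) (hk : 0 < k) (l : List String) (hl : l ≠ []) :
    pvChunks k l = l.take k :: pvChunks k (l.drop k) := by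
  rw [pvChunks]; rw [dif_neg (by simp [hl]; omega)]

lemma pvRange_pos_nil (a b s : Int) (hs : 0 < s) (hba : b ≤ a) :
    PySem.List.pyRange a b s = [] := by
  rw [PySem.List.pyRange_of_pos a b hs]
  rw [if_neg (by omega)]
  simp

lemma pvRange_pos_cons (a b s : Int) (hs : 0 < s) (hab : a < b) :
    PySem.List.pyRange a b s = a :: PySem.List.pyRange (a + s) b s := by
  rw [PySem.List.pyRange_of_pos a b hs, PySem.List.pyRange_of_pos (a + s) b hs]
  rw [if_pos hab]
  have key : (b - a + s - 1) / s = (b - a - 1) / s + 1 := by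
    have : b - a + s - 1 = (b - a - 1) + 1 * s := by ring
    rw [this, Int.add_mul_ediv_right _ _ (by omega)]
  have hq0 : 0 ≤ (b - a - 1) / s := Int.ediv_nonneg (by omega) (by omega)
  have hn : ((b - a + s - 1) / s).toNat = ((b - a - 1) / s).toNat + 1 := by
    rw [key]; omega
  rw [hn, List.range_succ_eq_map]
  simp only [List.map_cons, List.map_map, List.cons.injEq]
  refine ⟨by simp, ?_⟩
  by_cases hab2 : a + s < b
  · rw [if_pos hab2]
    have : b - (a + s) + s - 1 = b - a - 1 := by ring
    rw [this]
    apply List.map_congr_left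
    intro x _
    simp [Function.comp]
    ring
  · rw [if_neg hab2]
    have : (b - a - 1) / s = 0 := Int.ediv_eq_zero_of_lt (by omega) (by omega)
    simp [this]

-- A's loop: folding over the stride-k range, slicing the full list at each index,
-- produces the joins of the k-chunks of the remaining suffix.
lemma pv_A_loop (k : Nat) (hk : 0 < k) :
    ∀ (n : Nat) (full ws : List String) (a : Nat) (acc : List String),
      ws.length ≤ n → full.drop a = ws →
      (PySem.List.pyRange (a : Int) (full.length : Int) (k : Int)).foldl
          (fun fragmentos i =>
            fragmentos ++ [PySem.Str.join " " (PySem.List.slice full (some i) (some (i + (k : Int))))])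
          acc
        = acc ++ (pvChunks k ws).map (PySem.Str.join " ") := by
  intro n
  induction n with
  | zero =>
    intro full ws a acc hlen hdrop
    have hws : ws = [] := List.eq_nil_of_length_eq_zero (by omega)
    subst hws
    have hfa : full.length ≤ a := by
      by_contra hcon
      have := List.drop_eq_nil_iff.mp hdrop
      omega
    rw [pvRange_pos_nil _ _ _ (by exact_mod_cast hk) (by exact_mod_cast hfa)]
    simp [pvChunks_nil]
  | succ m ih =>
    intro full ws a acc hlen hdrop
    by_cases hws : ws = []
    · subst hws
      have hfa : full.length ≤ a := by
        by_contra hcon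
        have := List.drop_eq_nil_iff.mp hdrop
        omega
      rw [pvRange_pos_nil _ _ _ (by exact_mod_cast hk) (by exact_mod_cast hfa)]
      simp [pvChunks_nil]
    · have hfa : a < full.length := by
        by_contra hcon
        exact hws (by rw [← hdrop]; exact List.drop_eq_nil_iff.mpr (by omega))
      rw [pvRange_pos_cons _ _ _ (by exact_mod_cast hk) (by exact_mod_cast hfa)]
      rw [List.foldl_cons]
      have hslice : PySem.List.slice full (some (a : Int)) (some ((a : Int) + (k : Int))) = (full.drop a).take k :=
        PySem.List.slice_natCast_add full a k
      have hcast : ((a : Int) + (k : Int)) = ((a + k : Nat) : Int) := by push_cast; ring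
      have hdrop2 : full.drop (a + k) = ws.drop k := by
        rw [← hdrop, List.drop_drop]
      have hlen2 : (ws.drop k).length ≤ m := by
        have h1 : 1 ≤ ws.length := by
          cases ws with
          | nil => exact absurd rfl hws
          | cons x xs => simp
        simp only [List.length_drop]
        omega
      rw [hcast, ih full (ws.drop k) (a + k) _ hlen2 hdrop2]
      rw [pvChunks_cons k hk ws hws]
      simp [hslice, hdrop]

-- B's loop invariant: starting from fragments `frags` and a partial buffer `buf` (shorter than k),
-- running the fold over `ws` and flushing the leftover buffer yields the joins of the k-chunks of buf ++ ws.
lemma pv_B_loop (k : Nat) (hk : 0 < k) :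
    ∀ (ws frags buf : List String), buf.length < k →
      (let st := ws.foldl
          (fun (st : List String × List String) p =>
            let b := st.2 ++ [p]
            if PySem.List.len b = (k : Int) then (st.1 ++ [PySem.Str.join " " b], [])
            else (st.1, b))
          (frags, buf)
       if st.2 ≠ [] then st.1 ++ [PySem.Str.join " " st.2] else st.1)
        = frags ++ (pvChunks k (buf ++ ws)).map (PySem.Str.join " ") := by
  intro ws
  induction ws with
  | nil =>
    intro frags buf hbuf
    by_cases hb : buf = []
    · subst hb; simp [pvChunks_nil]
    · simp only [List.foldl_nil, List.append_nil]
      rw [if_pos hb]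
      rw [pvChunks_cons k hk buf hb]
      have ht : buf.take k = buf := List.take_of_length_le (by omega)
      have hd : buf.drop k = [] := List.drop_eq_nil_iff.mpr (by omega)
      simp [ht, hd, pvChunks_nil]
  | cons w rest ih =>
    intro frags buf hbuf
    simp only [List.foldl_cons]
    by_cases hfull : buf.length + 1 = k
    · have hcond : PySem.List.len (buf ++ [w]) = (k : Int) := by
        simp only [PySem.List.len_eq, List.length_append, List.length_cons, List.length_nil]
        push_cast; omega
      rw [if_pos hcond]
      have := ih (frags ++ [PySem.Str.join " " (buf ++ [w])]) [] hk
      simp only [List.nil_append] at this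
      rw [this]
      rw [show buf ++ w :: rest = (buf ++ [w]) ++ rest by simp]
      have hlen : (buf ++ [w]).length = k := by simp; omega
      conv_rhs => rw [pvChunks_cons k hk ((buf ++ [w]) ++ rest) (by simp)]
      rw [List.take_left' hlen, List.drop_left' hlen]
      simp
    · have hcond : ¬ (PySem.List.len (buf ++ [w]) = (k : Int)) := by
        simp only [PySem.List.len_eq, List.length_append, List.length_cons, List.length_nil]
        push_cast; omega
      rw [if_neg hcond]
      have := ih frags (buf ++ [w]) (by simp; omega)
      rw [this]
      simp

-- ===== VERDICT (by name: the statement is the Claim_ definition above) =====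
theorem dividir_en_fragmentos_spec : Claim_equal_dividir_en_fragmentos := by
  intro texto k _hdom hpre
  unfold Spec_dividir_en_fragmentos dividir_en_fragmentos dividir_en_fragmentos_alt
  by_cases hk1 : 1 ≤ k
  · have hkk : ((k.toNat : Int)) = k := Int.toNat_of_nonneg (by omega)
    have hkpos : 0 < k.toNat := by omega
    simp only [PySem.List.len_eq]
    by_cases hsmall : (((PySem.Str.split₀ texto).length : Nat) : Int) ≤ k
    · rw [if_pos hsmall, if_pos hsmall]
    · rw [if_neg hsmall, if_neg hsmall]
      have hA := pv_A_loop k.toNat hkpos (PySem.Str.split₀ texto).length (PySem.Str.split₀ texto)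
        (PySem.Str.split₀ texto) 0 [] (le_refl _) (by simp)
      have hB := pv_B_loop k.toNat hkpos (PySem.Str.split₀ texto) [] [] (by simpa using hkpos)
      rw [hkk] at hA hB
      simp only [List.nil_append, Nat.cast_zero] at hA hB
      exact hA.trans hB.symm
  · -- k ≤ 0, so by Pre_ the text has no words: both sides reduce on the empty word list
    have hpre' : 1 ≤ k ∨ PySem.Str.split₀ texto = [] := hpre
    have h2 : PySem.Str.split₀ texto = [] := hpre'.resolve_left hk1
    simp only [PySem.List.len_eq, h2, List.length_nil, Nat.cast_zero]
    by_cases hk0 : (0 : Int) ≤ k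
    · rw [if_pos hk0, if_pos hk0]
    · rw [if_neg hk0, if_neg hk0]
      simp [PySem.List.pyRange]
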